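-- pv_equiv track=rewrite | github.com/sangowu/rag_demo | src/chunk_manager.py | _extract_blocks
-- ===== SOURCE A (Python) =====
-- def _extract_blocks(text: str) -> list[str]:
--     """
--     Split document text into blocks, keeping Markdown tables intact.
--     A table block = consecutive lines starting with '|'.
--     Returns a list of text blocks (paragraphs or whole tables).
--     """
--     blocks = []
--     current_lines = []
--     table_lines = []
--
--     for line in text.splitlines():
--         if line.startswith('|'):
--             if current_lines:
--                 blocks.append('\n'.join(current_lines))
--                 current_lines = []
--             table_lines.append(line)
--         else:
--             if table_lines:
--                 blocks.append('\n'.join(table_lines))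
--                 table_lines = []
--             current_lines.append(line)
--
--     if table_lines:
--         blocks.append('\n'.join(table_lines))
--     if current_lines:
--         blocks.append('\n'.join(current_lines))
--
--     return blocks
-- ===== SOURCE B (Python) =====
-- def _extract_blocks(text: str) -> list[str]:
--     """
--     Split document text into blocks, keeping Markdown tables intact.
--
--     Staged-passes version: first compute the key of every line (is it a table
--     line), then the cut indices where the key changes, then slice the line list
--     between consecutive cuts and join each slice.
--     """
--     lines = text.splitlines()
--     if not lines:
--         return []
--     keys = [line.startswith('|') for line in lines]
--     cuts = [0] + [i + 1 for i, (a, b) in enumerate(zip(keys, keys[1:])) if a != b] + [len(lines)]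
--     return ['\n'.join(lines[a:b]) for a, b in zip(cuts, cuts[1:])]
-- ===== Notes on version B (the rewrite author's own statement) =====
-- stated objective: alternative
-- what changed: Replaces A's single-pass two-buffer flush-on-transition state machine with staged passes: compute per-line keys, then the list of cut indices where the key changes, then slice the line list between consecutive cuts and join each slice.
import Mathlib
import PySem

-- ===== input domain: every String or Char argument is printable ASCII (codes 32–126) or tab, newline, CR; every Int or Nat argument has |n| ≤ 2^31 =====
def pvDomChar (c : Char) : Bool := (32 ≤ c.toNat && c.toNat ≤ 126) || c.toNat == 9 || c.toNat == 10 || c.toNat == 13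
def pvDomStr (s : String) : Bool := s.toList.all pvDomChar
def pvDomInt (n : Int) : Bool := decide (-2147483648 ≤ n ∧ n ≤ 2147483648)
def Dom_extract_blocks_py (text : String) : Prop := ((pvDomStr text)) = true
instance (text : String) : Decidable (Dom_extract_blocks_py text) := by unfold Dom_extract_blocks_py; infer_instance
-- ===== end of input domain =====

-- B replaces A's two-buffer flush-on-transition state machine with staged passes:
-- per-line keys, then cut indices where the key changes, then slice-and-join (objective: alternative).


-- ===== PORT A =====
-- A's loop body, over the state (blocks, current_lines, table_lines)
def pvAStep (st : List String × List String × List String) (line : String) :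
    List String × List String × List String :=
  let (blocks, current_lines, table_lines) := st
  if PySem.Str.startswith line "|" then
    if current_lines ≠ [] then
      (blocks ++ [PySem.Str.join "\n" current_lines], [], table_lines ++ [line])
    else
      (blocks, current_lines, table_lines ++ [line])
  else
    if table_lines ≠ [] then
      (blocks ++ [PySem.Str.join "\n" table_lines], current_lines ++ [line], [])
    else
      (blocks, current_lines ++ [line], table_lines)

-- A's trailing flushes after the loop
def pvAFinish (st : List String × List String × List String) : List String :=
  let (blocks, current_lines, table_lines) := st
  let blocks := if table_lines ≠ [] then blocks ++ [PySem.Str.join "\n" table_lines] else blocks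
  if current_lines ≠ [] then blocks ++ [PySem.Str.join "\n" current_lines] else blocks

def extract_blocks_py (text : String) : List String :=
  pvAFinish ((PySem.Str.splitlines text).foldl pvAStep ([], [], []))

-- ===== PORT B =====
-- the cut-index comprehension '[i + 1 for i, (a, b) in enumerate(zip(keys, keys[1:])) if a != b]'
-- (the enumerate start s is a parameter for the proofs; Source B uses Python's default start 0)
def pvCuts (s : Int) (keys : List Bool) : List Int :=
  (PySem.List.enumerate (keys.zip keys.tail) s).filterMap
    (fun p => if p.2.1 ≠ p.2.2 then some (p.1 + 1) else none)

def extract_blocks_py_alt (text : String) : List String :=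
  let lines := PySem.Str.splitlines text
  if lines = [] then []
  else
    let keys := lines.map (fun line => PySem.Str.startswith line "|")
    let cuts : List Int := [0] ++ pvCuts 0 keys ++ [(lines.length : Int)]
    (cuts.zip cuts.tail).map
      (fun p => PySem.Str.join "\n" (PySem.List.slice lines (some p.1) (some p.2)))

-- ===== PRECONDITION & SPEC =====
def Spec_extract_blocks_py (text : String) (out : List String) : Prop := out = extract_blocks_py_alt text
instance (text : String) (out : List String) : Decidable (Spec_extract_blocks_py text out) := by unfold Spec_extract_blocks_py; infer_instance

-- ===== CLAIM (what is proved, stated in full; the proofs are below) =====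
def Claim_equal_extract_blocks_py : Prop := ∀ (text : String), Dom_extract_blocks_py text → Spec_extract_blocks_py text (extract_blocks_py text)

-- ===== LEMMAS AND PROOFS =====

def pvKey (line : String) : Bool := PySem.Str.startswith line "|"

-- maximal runs of consecutive lines with equal key (the common reference form)
def pvGroupsAux (k : Bool) (acc : List String) : List String → List (List String)
  | [] => [acc]
  | l :: ls =>
    if pvKey l = k then pvGroupsAux k (acc ++ [l]) ls
    else acc :: pvGroupsAux (pvKey l) [l] ls

def pvGroups : List String → List (List String)
  | [] => []
  | l :: ls => pvGroupsAux (pvKey l) [l] ls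

-- ---------- A = map join (pvGroups lines) ----------

-- what A's remaining loop + final flushes produce, given the pending state
def pvRest (cur tab : List String) (ls : List String) : List (List String) :=
  if tab ≠ [] then pvGroupsAux true tab ls
  else if cur ≠ [] then pvGroupsAux false cur ls
  else pvGroups ls

theorem pvA_invariant (ls : List String) (blocks cur tab : List String)
    (htab : ∀ l ∈ tab, pvKey l = true)
    (hex : cur = [] ∨ tab = []) :
    pvAFinish (ls.foldl pvAStep (blocks, cur, tab))
    = blocks ++ (pvRest cur tab ls).map (fun g => PySem.Str.join "\n" g) := by
  induction ls generalizing blocks cur tab with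
  | nil =>
    rcases hex with h | h <;> subst h
    · by_cases ht : tab = []
      · subst ht; simp [pvAFinish, pvRest, pvGroups]
      · simp [pvAFinish, pvRest, ht, pvGroupsAux]
    · by_cases hc : cur = []
      · subst hc; simp [pvAFinish, pvRest, pvGroups]
      · simp [pvAFinish, pvRest, hc, pvGroupsAux]
  | cons l ls ih =>
    rw [List.foldl_cons]
    by_cases hk : pvKey l = true
    · rcases hex with h | h
      · subst h
        have hstep : pvAStep (blocks, [], tab) l = (blocks, [], tab ++ [l]) := by
          simp [pvAStep, pvKey] at hk ⊢; simp [hk]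
        rw [hstep, ih blocks [] (tab ++ [l])
            (fun x hx => by
              rcases List.mem_append.1 hx with h | h
              · exact htab x h
              · simp at h; subst h; exact hk)
            (Or.inl rfl)]
        by_cases ht : tab = []
        · subst ht; simp [pvRest, pvGroups, hk]
        · simp [pvRest, ht, pvGroupsAux, hk]
      · subst h
        by_cases hc : cur = []
        · subst hc
          have hstep : pvAStep (blocks, [], []) l = (blocks, [], [l]) := by
            simp [pvAStep, pvKey] at hk ⊢; simp [hk]
          rw [hstep, ih blocks [] [l] (by simpa using hk) (Or.inl rfl)]
          simp [pvRest, pvGroups, hk]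
        · have hstep : pvAStep (blocks, cur, []) l
              = (blocks ++ [PySem.Str.join "\n" cur], [], [l]) := by
            simp [pvAStep, pvKey] at hk ⊢; simp [hk, hc]
          rw [hstep, ih _ [] [l] (by simpa using hk) (Or.inl rfl)]
          simp [pvRest, hc, pvGroupsAux, hk]
    · replace hk : pvKey l = false := by simpa using hk
      rcases hex with h | h
      · subst h
        by_cases ht : tab = []
        · subst ht
          have hstep : pvAStep (blocks, [], []) l = (blocks, [l], []) := by
            simp [pvAStep, pvKey] at hk ⊢; simp [hk]
          rw [hstep, ih blocks [l] [] (by simp) (Or.inr rfl)]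
          simp [pvRest, pvGroups, hk]
        · have hstep : pvAStep (blocks, [], tab) l
              = (blocks ++ [PySem.Str.join "\n" tab], [l], []) := by
            simp [pvAStep, pvKey] at hk ⊢; simp [hk, ht]
          rw [hstep, ih _ [l] [] (by simp) (Or.inr rfl)]
          simp [pvRest, ht, pvGroupsAux, hk]
      · subst h
        have hstep : pvAStep (blocks, cur, []) l = (blocks, cur ++ [l], []) := by
          simp [pvAStep, pvKey] at hk ⊢; simp [hk]
        rw [hstep, ih blocks (cur ++ [l]) [] (by simp) (Or.inr rfl)]
        by_cases hc : cur = []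
        · subst hc; simp [pvRest, pvGroups, hk]
        · simp [pvRest, hc, pvGroupsAux, hk]

-- ---------- B = map join (pvGroups lines) ----------

-- partial sums of group lengths: 0 :: pvPTail ps, ending at (flatten ps).length
def pvPTail : List (List String) → List Nat
  | [] => []
  | p :: ps => (0 :: pvPTail ps).map (· + p.length)

def pvPSums (ps : List (List String)) : List Nat := 0 :: pvPTail ps

theorem pvCuts_cons (s : Int) (k k' : Bool) (rest : List Bool) :
    pvCuts s (k :: k' :: rest)
      = (if k ≠ k' then [s + 1] else []) ++ pvCuts (s + 1) (k' :: rest) := by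
  by_cases h : k = k'
  · subst h; simp [pvCuts, PySem.List.enumerate_cons]
  · simp [pvCuts, PySem.List.enumerate_cons, h]

def pvInts (xs : List Nat) : List Int := xs.map Int.ofNat

theorem pv_map_cast_add (m : Nat) (xs : List Nat) :
    pvInts (xs.map (· + m)) = (pvInts xs).map (· + (m : Int)) := by
  unfold pvInts
  rw [List.map_map, List.map_map]
  apply List.map_congr_left
  intro x hx
  simp

theorem pvPSums_cons_int (p : List String) (ps : List (List String)) :
    pvInts (pvPSums (p :: ps))
      = 0 :: (pvInts (pvPSums ps)).map (· + (p.length : Int)) := by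
  show pvInts ((0 : Nat) :: ((0 :: pvPTail ps).map (· + p.length))) = _
  unfold pvInts
  rw [List.map_cons, ← pvInts, pv_map_cast_add]
  norm_num [pvPSums, pvInts]

theorem pvGroups_flatten (ls : List String) (k : Bool) (acc : List String) :
    (pvGroupsAux k acc ls).flatten = acc ++ ls := by
  induction ls generalizing k acc with
  | nil => simp [pvGroupsAux]
  | cons l ls ih =>
    by_cases h : pvKey l = k
    · simp [pvGroupsAux, h, ih]
    · simp [pvGroupsAux, h, ih]

-- the cuts comprehension computes the partial sums of the group lengths
theorem pvH (ls : List String) (k : Bool) (acc : List String) (s : Int) :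
    pvInts (pvPSums (pvGroupsAux k acc ls))
      = 0 :: ((pvCuts s (k :: ls.map pvKey) ++ [s + 1 + (ls.length : Int)]).map
          (· + ((acc.length : Int) - 1 - s))) := by
  induction ls generalizing k acc s with
  | nil =>
    simp [pvGroupsAux, pvPSums, pvPTail, pvCuts, pvInts]
    ring
  | cons l ls ih =>
    by_cases h : pvKey l = k
    · rw [List.map_cons, h, pvCuts_cons, if_neg (show ¬ k ≠ k from by simp), List.nil_append]
      rw [pvGroupsAux, if_pos h, ih k (acc ++ [l]) (s + 1)]
      congr 1
      have e1 : s + 1 + 1 + (ls.length : Int) = s + 1 + ((l :: ls).length : Int) := by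
        simp only [List.length_cons]; push_cast; ring
      rw [e1]
      apply List.map_congr_left
      intro x hx
      simp only [List.length_append, List.length_cons, List.length_nil]
      push_cast
      ring
    · rw [List.map_cons, pvCuts_cons, if_pos (show k ≠ pvKey l from fun e => h e.symm)]
      rw [pvGroupsAux, if_neg h, pvPSums_cons_int, ih (pvKey l) [l] (s + 1)]
      simp only [List.map_cons, List.map_append, List.map_map, List.cons_append, List.map_nil,
        List.length_cons, List.length_nil]
      simp only [List.nil_append]
      congr 2
      · ring
      congr 1
      · apply List.map_congr_left
        intro x hx
        simp only [Function.comp_apply]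
        push_cast
        ring
      · congr 1
        push_cast
        ring

theorem pvInts_pvPSums (ps : List (List String)) :
    pvInts (pvPSums ps) = 0 :: pvInts (pvPTail ps) := by
  simp [pvPSums, pvInts]

theorem pvSlice_mid (pre p r : List String) :
    PySem.List.slice (pre ++ (p ++ r)) (some (pre.length : Int))
        (some (((pre.length + p.length : Nat)) : Int)) = p := by
  rw [PySem.List.slice_natCast]
  rw [List.drop_left, Nat.add_sub_cancel_left, List.take_left]

theorem pvL2gen (ps : List (List String)) : ∀ (pre : List String),
    (((pvInts (pvPSums ps)).map (· + (pre.length : Int))).zip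
      (((pvInts (pvPSums ps)).map (· + (pre.length : Int))).tail)).map
        (fun q => PySem.List.slice (pre ++ ps.flatten) (some q.1) (some q.2)) = ps := by
  induction ps with
  | nil => intro pre; simp [pvPSums, pvPTail, pvInts]
  | cons p qs ih =>
    intro pre
    rw [pvPSums_cons_int]
    have hmm : ((pvInts (pvPSums qs)).map (· + (p.length : Int))).map (· + (pre.length : Int))
        = (pvInts (pvPSums qs)).map (· + (((pre ++ p).length : Nat) : Int)) := by
      rw [List.map_map]
      apply List.map_congr_left
      intro x hx
      simp only [Function.comp_apply, List.length_append]
      push_cast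
      ring
    rw [List.map_cons, hmm, pvInts_pvPSums, List.map_cons]
    simp only [List.flatten_cons, zero_add, List.tail_cons, List.zip_cons_cons, List.map_cons]
    congr 1
    · have hs := pvSlice_mid pre p qs.flatten
      simpa [List.length_append] using hs
    · have hIH := ih (pre ++ p)
      simp only [pvInts_pvPSums, List.map_cons, zero_add, List.tail_cons] at hIH
      rw [← List.append_assoc]
      exact hIH

theorem pvL2 (ps : List (List String)) :
    ((pvInts (pvPSums ps)).zip (pvInts (pvPSums ps)).tail).map
        (fun p => PySem.List.slice ps.flatten (some p.1) (some p.2)) = ps := by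
  have h := pvL2gen ps []
  simpa using h

theorem pvCutsEq (l : String) (ls : List String) :
    [(0 : Int)] ++ pvCuts 0 ((l :: ls).map (fun line => PySem.Str.startswith line "|"))
        ++ [(((l :: ls).length : Nat) : Int)]
      = pvInts (pvPSums (pvGroups (l :: ls))) := by
  show [(0 : Int)] ++ pvCuts 0 ((l :: ls).map pvKey) ++ [(((l :: ls).length : Nat) : Int)]
      = pvInts (pvPSums (pvGroupsAux (pvKey l) [l] ls))
  rw [pvH ls (pvKey l) [l] 0]
  simp
  ring

theorem pvGroups_flatten' (l : String) (ls : List String) :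
    (pvGroups (l :: ls)).flatten = l :: ls := by
  simpa [pvGroups] using pvGroups_flatten ls (pvKey l) [l]

-- ===== VERDICT (by name: the statement is the Claim_ definition above) =====
theorem extract_blocks_py_spec : Claim_equal_extract_blocks_py := by
  intro text _
  show extract_blocks_py text = extract_blocks_py_alt text
  rw [extract_blocks_py, extract_blocks_py_alt]
  cases hls : PySem.Str.splitlines text with
  | nil => simp [pvAFinish]
  | cons l ls =>
    rw [if_neg (by simp)]
    rw [pvA_invariant (l :: ls) [] [] [] (by simp) (Or.inl rfl)]
    simp only [pvRest, ne_eq, not_true_eq_false, if_false, List.nil_append]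
    rw [pvCutsEq l ls]
    have hflat := pvGroups_flatten' l ls
    have h2 := congrArg (List.map (PySem.Str.join "\n")) (pvL2 (pvGroups (l :: ls)))
    rw [List.map_map] at h2
    rw [hflat] at h2
    exact h2.symm
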